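-- pv_equiv track=rewrite | github.com/KCayo/CSE-1010--Intro-Computing-for-Engineers | errorcorrection.py | segmentString
-- ===== SOURCE A (Python) =====
-- def segmentString(string, fillchar):
--     "'Converts a string into an 8 character list, any extra space will be filled by the fillchar variable. frame=string2frames(string, fillchar)'"
--     segmentString= []
--     n = 0
--     while n<len(string):
--         h=string[n:n+8]
--         if len(h)<8:
--             h = h.ljust(8, fillchar)
--             segmentString.append(h)
--         else:
--             segmentString.append(h)
--         n=n+8
--     return segmentString
-- ===== SOURCE B (Python) =====
-- def segmentString(string, fillchar):
--     out = []
--     buf = ""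
--     for ch in string:
--         buf += ch
--         if len(buf) == 8:
--             out.append(buf)
--             buf = ""
--     if buf:
--         out.append(buf.ljust(8, fillchar))
--     return out
-- ===== Notes on version B (the rewrite author's own statement) =====
-- stated objective: alternative
-- what changed: B makes a single character-by-character pass with a buffer accumulator, emitting a chunk whenever the buffer reaches 8 characters and padding only the leftover buffer once after the pass, instead of A's index-striding while loop that slices string[n:n+8] and length-tests and pads each slice.
import Mathlib
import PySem

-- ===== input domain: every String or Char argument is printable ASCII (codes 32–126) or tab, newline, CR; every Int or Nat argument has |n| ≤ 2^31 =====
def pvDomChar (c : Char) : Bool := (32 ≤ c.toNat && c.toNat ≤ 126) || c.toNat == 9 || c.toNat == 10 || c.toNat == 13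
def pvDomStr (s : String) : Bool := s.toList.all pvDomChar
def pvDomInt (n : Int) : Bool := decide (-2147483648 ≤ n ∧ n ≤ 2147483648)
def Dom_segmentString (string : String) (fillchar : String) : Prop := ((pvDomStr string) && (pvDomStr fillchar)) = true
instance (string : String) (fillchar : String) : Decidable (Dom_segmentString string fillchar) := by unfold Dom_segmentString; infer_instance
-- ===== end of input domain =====

-- B replaces A's index-striding slice-and-ljust loop with a single character-by-character
-- pass over a buffer accumulator, padding only the leftover buffer once at the end.
-- Return values only; neither program mutates its arguments.

-- ===== PORT A =====
-- The while loop over index n (advancing by 8); acc is the growing result list.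
-- string[n:n+8] with n ≥ 0 is (cs.drop n).take 8 (exact for nonnegative in-range start).
-- h.ljust(8, fillchar) = h ++ replicate (8 - len h) fillchar[0]: exact whenever fillchar is a
-- single character, which Pre_segmentString guarantees on every input where this branch runs.
def segmentStringAux (cs : List Char) (fill : List Char) (acc : List String) (n : Nat) : List String :=
  if n < cs.length then
    let h := (cs.drop n).take 8
    if h.length < 8 then
      segmentStringAux cs fill (acc ++ [String.ofList (h ++ List.replicate (8 - h.length) (fill.headD ' '))]) (n + 8)
    else
      segmentStringAux cs fill (acc ++ [String.ofList h]) (n + 8)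
  else acc
termination_by cs.length - n

def segmentString (string : String) (fillchar : String) : List String :=
  segmentStringAux string.toList fillchar.toList [] 0

-- ===== PORT B =====
-- The for-loop body: append ch to buf; when buf reaches 8 characters, flush it to out.
def segAltStep (acc : List String × List Char) (c : Char) : List String × List Char :=
  let buf := acc.2 ++ [c]
  if buf.length = 8 then (acc.1 ++ [String.ofList buf], []) else (acc.1, buf)

-- buf.ljust(8, fillchar) = buf ++ replicate (8 - len buf) fillchar[0]: exact whenever
-- fillchar is a single character, which Pre_segmentString guarantees where this branch runs.
def segmentString_alt (string : String) (fillchar : String) : List String :=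
  let p := string.toList.foldl segAltStep ([], [])
  if p.2 = [] then p.1
  else p.1 ++ [String.ofList (p.2 ++ List.replicate (8 - p.2.length) (fillchar.toList.headD ' '))]

-- ===== PRECONDITION & SPEC =====
-- Pre_ excludes exactly the inputs where both Pythons raise TypeError: a string whose length
-- is not a multiple of 8 together with a fillchar that is not a single character (the final
-- ljust raises in A and in B alike).
def Pre_segmentString (string : String) (fillchar : String) : Prop :=
  string.toList.length % 8 = 0 ∨ fillchar.toList.length = 1
instance (string : String) (fillchar : String) : Decidable (Pre_segmentString string fillchar) := by
  unfold Pre_segmentString; infer_instance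

def pvWitness_segmentString : String × String := ("abcdefghij", "x")

def Spec_segmentString (string : String) (fillchar : String) (out : List String) : Prop := out = segmentString_alt string fillchar
instance (string : String) (fillchar : String) (out : List String) : Decidable (Spec_segmentString string fillchar out) := by unfold Spec_segmentString; infer_instance

-- ===== CLAIM (what is proved, stated in full; the proofs are below) =====
def Claim_equal_segmentString : Prop := ∀ (string : String) (fillchar : String), Dom_segmentString string fillchar → Pre_segmentString string fillchar → Spec_segmentString string fillchar (segmentString string fillchar)

-- ===== LEMMAS AND PROOFS =====

-- Characterisation of A's loop: 8-chunks, padding the short last one with one char.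
def chunksPad (cs : List Char) (f : Char) : List String :=
  if cs = [] then []
  else if cs.length < 8 then [String.ofList (cs ++ List.replicate (8 - cs.length) f)]
  else String.ofList (cs.take 8) :: chunksPad (cs.drop 8) f
termination_by cs.length
decreasing_by simp_all [List.length_drop]; omega

lemma chunksPad_nil (f : Char) : chunksPad [] f = [] := by rw [chunksPad]; simp

lemma aux_eq_gen (cs fill : List Char) :
    ∀ (m n : Nat) (acc : List String), cs.length - n ≤ m →
    segmentStringAux cs fill acc n = acc ++ chunksPad (cs.drop n) (fill.headD ' ') := by
  intro m
  induction m with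
  | zero =>
    intro n acc h
    have hn : ¬ n < cs.length := by omega
    have hnil : cs.drop n = [] := by rw [List.drop_eq_nil_iff]; omega
    rw [segmentStringAux, if_neg hn, hnil, chunksPad_nil]
    simp
  | succ m ih =>
    intro n acc h
    rw [segmentStringAux]
    by_cases hn : n < cs.length
    · simp only [if_pos hn]
      have hdlen : (cs.drop n).length = cs.length - n := by simp
      have hdne : cs.drop n ≠ [] := by
        intro hcon; rw [← List.length_eq_zero_iff] at hcon; omega
      have hrec : cs.length - (n + 8) ≤ m := by omega
      by_cases hshort : ((cs.drop n).take 8).length < 8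
      · have h8 : (cs.drop n).length < 8 := by simp at hshort; omega
        rw [if_pos hshort]
        have hnil : cs.drop (n + 8) = [] := by rw [List.drop_eq_nil_iff]; omega
        rw [ih (n + 8) _ hrec, hnil, chunksPad_nil]
        conv_rhs => rw [chunksPad]
        rw [if_neg hdne, if_pos h8]
        simp [List.take_of_length_le (le_of_lt h8)]
      · have h8 : ¬ (cs.drop n).length < 8 := by simp at hshort; omega
        rw [if_neg hshort]
        have hdd : cs.drop (n + 8) = (cs.drop n).drop 8 := by
          rw [List.drop_drop, Nat.add_comm]
        rw [ih (n + 8) _ hrec, hdd]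
        conv_rhs => rw [chunksPad]
        rw [if_neg hdne, if_neg h8]
        simp
    · rw [if_neg hn]
      have hnil : cs.drop n = [] := by rw [List.drop_eq_nil_iff]; omega
      rw [hnil, chunksPad_nil]
      simp

-- B's fold with an under-8 buffer produces exactly the padded chunks of buf ++ cs.
lemma fold_eq_chunksPad (f : Char) :
    ∀ (cs : List Char) (out : List String) (buf : List Char), buf.length < 8 →
    (let p := cs.foldl segAltStep (out, buf)
     if p.2 = [] then p.1
     else p.1 ++ [String.ofList (p.2 ++ List.replicate (8 - p.2.length) f)])
    = out ++ chunksPad (buf ++ cs) f := by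
  intro cs
  induction cs with
  | nil =>
    intro out buf hb
    simp only [List.foldl_nil, List.append_nil]
    by_cases hbuf : buf = []
    · subst hbuf; simp [chunksPad_nil]
    · rw [if_neg hbuf]
      conv_rhs => rw [chunksPad]
      rw [if_neg hbuf, if_pos hb]
  | cons c cs ih =>
    intro out buf hb
    simp only [List.foldl_cons]
    rw [segAltStep]
    simp only
    by_cases h8 : (buf ++ [c]).length = 8
    · rw [if_pos h8]
      have := ih (out ++ [String.ofList (buf ++ [c])]) [] (by norm_num)
      simp only [List.nil_append] at this
      rw [this]
      have hne : buf ++ [c] ++ cs ≠ [] := by simp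
      conv_rhs => rw [show buf ++ c :: cs = (buf ++ [c]) ++ cs by simp, chunksPad]
      rw [if_neg hne, if_neg (by simp [List.length_append] at h8 ⊢; omega)]
      rw [List.take_append_of_le_length (by omega), List.take_of_length_le (by omega),
          List.drop_append_of_le_length (by omega), List.drop_of_length_le (by omega)]
      simp
    · rw [if_neg h8]
      have hlt : (buf ++ [c]).length < 8 := by simp at h8 ⊢; omega
      rw [ih out (buf ++ [c]) hlt]
      simp
  
-- ===== VERDICT (by name: the statement is the Claim_ definition above) =====
theorem segmentString_spec : Claim_equal_segmentString := by
  intro s f _ _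
  unfold Spec_segmentString segmentString segmentString_alt
  rw [aux_eq_gen s.toList f.toList s.toList.length 0 [] (by omega)]
  simp only [List.drop_zero, List.nil_append]
  have := fold_eq_chunksPad (f.toList.headD ' ') s.toList [] [] (by norm_num)
  simp only [List.nil_append] at this
  rw [this]
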